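-- pv_equiv track=rewrite | github.com/ayahuasca09/ayahuasca | test/test.py | is_valid_input
-- ===== SOURCE A (Python) =====
-- def is_valid_input(input_string):
--     # 删除空格
--     input_string = input_string.replace(" ", "")
--
--     # 检查是否仅包含数字和逗号
--     if not all(c.isdigit() or c == ',' for c in input_string):
--         return False
--
--     # 拆分字符串并转换为整数列表
--     try:
--         numbers = list(map(int, input_string.split(',')))
--     except ValueError:
--         return False
--
--     # 检查是否有重复
--     if len(numbers) != len(set(numbers)):
--         return False
--
--     return True
-- ===== SOURCE B (Python) =====
-- def is_valid_input(input_string):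
--     tokens = input_string.replace(" ", "").split(',')
--     # token-level validation (an empty token fails isdigit, so int never sees an empty token)
--     if not all(token.isdigit() for token in tokens):
--         return False
--     try:
--         values = sorted(map(int, tokens))
--     except ValueError:
--         return False
--     # duplicates show up as an equal adjacent pair in the sorted order
--     return all(a < b for a, b in zip(values, values[1:]))
-- ===== Notes on version B (the rewrite author's own statement) =====
-- stated objective: alternative
-- what changed: validation moves from A's whole-string character scan to a token-level isdigit pass (which also subsumes the empty-token int failure case), and duplicate detection is done by sorting the parsed values and scanning adjacent pairs for a strict increase instead of A's len-vs-set cardinality comparison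
import Mathlib
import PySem

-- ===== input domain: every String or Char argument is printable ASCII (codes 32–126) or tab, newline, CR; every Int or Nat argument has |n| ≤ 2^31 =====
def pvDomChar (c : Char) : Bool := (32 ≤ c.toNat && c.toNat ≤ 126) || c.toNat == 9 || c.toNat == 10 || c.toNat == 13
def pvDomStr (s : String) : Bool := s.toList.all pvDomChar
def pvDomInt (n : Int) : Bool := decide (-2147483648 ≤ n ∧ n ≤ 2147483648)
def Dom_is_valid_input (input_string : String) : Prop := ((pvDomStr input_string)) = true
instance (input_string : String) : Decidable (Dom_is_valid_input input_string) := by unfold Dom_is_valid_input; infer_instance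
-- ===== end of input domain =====

-- B validates at token level and finds duplicates by sorting the parsed values and scanning
-- adjacent pairs, instead of A's character scan plus len-vs-set comparison; no speed claim.

-- ===== PORT A =====
def is_valid_input (input_string : String) : Bool :=
  -- input_string = input_string.replace(" ", "")
  let s := PySem.Chars.replace input_string.toList [' '] []
  -- if not all(c.isdigit() or c == ',' for c in input_string): return False
  if !(s.all (fun c => PySem.Chars.isdigit c || c == ',')) then false
  else
    -- try: numbers = list(map(int, input_string.split(','))) except ValueError: return False
    match (PySem.Chars.splitOn s [',']).mapM PySem.Int.ofChars? with
    | none => false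
    | some numbers =>
      -- if len(numbers) != len(set(numbers)): return False
      if numbers.length ≠ (PySem.Set.ofList numbers).length then false
      else true

-- ===== PORT B =====
def is_valid_input_alt (input_string : String) : Bool :=
  -- tokens = input_string.replace(" ", "").split(',')
  let tokens := PySem.Chars.splitOn (PySem.Chars.replace input_string.toList [' '] []) [',']
  -- if not all(token.isdigit() for token in tokens): return False
  if !(tokens.all (fun token => PySem.Chars.strIsdigit token)) then false
  else
    -- try: values = sorted(map(int, tokens)) except ValueError: return False
    match tokens.mapM PySem.Int.ofChars? with
    | none => false
    | some vs =>
      let values := PySem.List.sorted vs (fun v => v) false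
      -- return all(a < b for a, b in zip(values, values[1:]))
      (values.zip (PySem.List.slice values (some 1) none)).all (fun p => decide (p.1 < p.2))

-- ===== PRECONDITION & SPEC =====
def Spec_is_valid_input (input_string : String) (out : Bool) : Prop := out = is_valid_input_alt input_string
instance (input_string : String) (out : Bool) : Decidable (Spec_is_valid_input input_string out) := by unfold Spec_is_valid_input; infer_instance

-- ===== CLAIM (what is proved, stated in full; the proofs are below) =====
def Claim_equal_is_valid_input : Prop := ∀ (input_string : String), Dom_is_valid_input input_string → Spec_is_valid_input input_string (is_valid_input input_string)

-- ===== LEMMAS AND PROOFS =====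

-- splitting on a single character, structurally
def pvSplitChar (c : Char) : List Char → List (List Char)
  | [] => [[]]
  | a :: rest =>
    if a == c then [] :: pvSplitChar c rest
    else
      match pvSplitChar c rest with
      | [] => [[a]]          -- unreachable: pvSplitChar never returns []
      | h :: t => (a :: h) :: t

theorem pvSplitChar_ne_nil (c : Char) (l : List Char) : pvSplitChar c l ≠ [] := by
  induction l with
  | nil => simp [pvSplitChar]
  | cons a rest ih =>
    simp only [pvSplitChar]
    split
    · simp
    · cases h : pvSplitChar c rest with
      | nil => simp
      | cons x xs => simp

-- prepend a prefix onto the first piece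
def pvConsHead (pre : List Char) : List (List Char) → List (List Char)
  | [] => [pre]
  | h :: t => (pre ++ h) :: t

theorem pvSplitOn_go_eq (c : Char) (l cur : List Char) (acc : List (List Char)) (fuel : Nat)
    (h : l.length < fuel) :
    PySem.Chars.splitOn.go [c] fuel l cur acc
      = acc.reverse ++ pvConsHead cur.reverse (pvSplitChar c l) := by
  induction l generalizing cur acc fuel with
  | nil =>
    rw [PySem.Chars.splitOn.go.eq_def]
    cases fuel with
    | zero => omega
    | succ n => simp [pvSplitChar, pvConsHead]
  | cons a rest ih =>
    cases fuel with
    | zero => omega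
    | succ n =>
      rw [PySem.Chars.splitOn.go.eq_def]
      simp only [List.isPrefixOf_cons₂, List.isPrefixOf_nil_left, Bool.and_true]
      by_cases hac : a = c
      · subst hac
        simp only [beq_self_eq_true, if_pos, List.length_cons, List.length_nil,
          List.drop_succ_cons, List.drop_zero]
        rw [ih _ _ n (by simpa using h)]
        rw [show pvSplitChar a (a :: rest) = [] :: pvSplitChar a rest from by
          rw [pvSplitChar.eq_def]; simp]
        cases hsp : pvSplitChar a rest with
        | nil => exact absurd hsp (pvSplitChar_ne_nil a rest)
        | cons x xs => simp [pvConsHead]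
      · have hb : (c == a) = false := by
          rw [beq_eq_false_iff_ne]
          exact fun e => hac e.symm
        simp only [hb, Bool.false_eq_true, if_false]
        rw [ih _ _ n (by simpa using Nat.lt_of_succ_lt_succ h)]
        have hab : (a == c) = false := by simpa using hac
        cases hsp : pvSplitChar c rest with
        | nil => exact absurd hsp (pvSplitChar_ne_nil c rest)
        | cons x xs =>
          simp only [pvSplitChar, hab, Bool.false_eq_true, if_false, hsp]
          simp [pvConsHead]

theorem pvSplitOn_eq (c : Char) (l : List Char) :
    PySem.Chars.splitOn l [c] = pvSplitChar c l := by
  unfold PySem.Chars.splitOn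
  rw [pvSplitOn_go_eq c l [] [] (l.length + 1) (by omega)]
  cases h : pvSplitChar c l with
  | nil => exact absurd h (pvSplitChar_ne_nil c l)
  | cons x xs => simp [pvConsHead]

-- the global character scan seen through the tokens
theorem pvSplitChar_all (c : Char) (q : Char → Bool) (l : List Char) :
    (pvSplitChar c l).all (fun t => t.all q) = l.all (fun a => a == c || q a) := by
  induction l with
  | nil => simp [pvSplitChar]
  | cons a rest ih =>
    simp only [pvSplitChar]
    by_cases hac : a = c
    · subst hac; simp [ih]
    · have hb : (a == c) = false := by simpa using hac
      cases hsp : pvSplitChar c rest with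
      | nil => exact absurd hsp (pvSplitChar_ne_nil c rest)
      | cons x xs =>
        rw [hsp] at ih
        simp only [hb, Bool.false_eq_true, if_false, List.all_cons, Bool.false_or] at *
        rw [Bool.and_assoc, ih]

-- mapM int over the tokens fails as soon as one token is the empty string
theorem pvMapM_none_of_nil_mem (ts : List (List Char)) (h : [] ∈ ts) :
    ts.mapM PySem.Int.ofChars? = none := by
  induction ts with
  | nil => simp at h
  | cons t rest ih =>
    rcases List.mem_cons.mp h with rfl | hmem
    · simp [List.mapM_cons, show PySem.Int.ofChars? ([] : List Char) = none from by decide]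
    · rw [List.mapM_cons]
      cases PySem.Int.ofChars? t with
      | none => rfl
      | some v => simp [ih hmem]

-- Python's len(xs) == len(set(xs)) is Nodup
theorem pv_len_set_eq_iff (nums : List Int) :
    nums.length = (PySem.Set.ofList nums).length ↔ nums.Nodup := by
  constructor
  · intro h
    have hnd := PySem.Set.nodup_ofList (xs := nums)
    have hset : (PySem.Set.ofList nums).toFinset = nums.toFinset := by
      ext x
      simp [List.mem_toFinset, PySem.Set.mem_ofList]
    have h1 := List.toFinset_card_of_nodup hnd
    rw [hset, List.card_toFinset] at h1
    have hlen : nums.dedup.length = nums.length := by omega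
    have hdd := List.Sublist.eq_of_length (List.dedup_sublist nums) hlen
    rw [← hdd]
    exact List.nodup_dedup nums
  · intro h
    rw [PySem.Set.ofList_eq_self_of_nodup nums h]

-- on a ≤-ordered list, 'every adjacent pair strictly increases' is exactly Nodup
theorem pvAdjAll_iff_nodup (l : List Int) (hord : l.Pairwise (· ≤ ·)) :
    ((l.zip l.tail).all (fun p => decide (p.1 < p.2)) = true) ↔ l.Nodup := by
  induction l with
  | nil => simp
  | cons a t ih =>
    rcases List.pairwise_cons.mp hord with ⟨ha, ht⟩
    cases t with
    | nil => simp
    | cons b t' =>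
      have hrest := ih ht
      rcases List.pairwise_cons.mp ht with ⟨hb, -⟩
      simp only [List.tail_cons, List.zip_cons_cons, List.all_cons, Bool.and_eq_true,
        decide_eq_true_eq] at hrest ⊢
      rw [hrest]
      constructor
      · rintro ⟨hab, hnd⟩
        refine List.nodup_cons.mpr ⟨?_, hnd⟩
        intro hmem
        rcases List.mem_cons.mp hmem with rfl | hc
        · exact lt_irrefl a hab
        · exact lt_irrefl a (lt_of_lt_of_le hab (hb a hc))
      · intro hnd
        rcases List.nodup_cons.mp hnd with ⟨hanot, hnd'⟩
        exact ⟨lt_of_le_of_ne (ha b (List.mem_cons_self ..))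
          (fun he => hanot (he ▸ List.mem_cons_self ..)), hnd'⟩

-- B's sorted adjacent-pair scan detects duplicates exactly
theorem pvSortScan_iff_nodup (vs : List Int) :
    (((PySem.List.sorted vs (fun v => v) false).zip
        ((PySem.List.sorted vs (fun v => v) false).tail)).all
          (fun p => decide (p.1 < p.2)) = true) ↔ vs.Nodup := by
  have hperm : (PySem.List.sorted vs (fun v => v) false).Perm vs :=
    PySem.List.sorted_perm vs (fun v => v) false
  have hord : (PySem.List.sorted vs (fun v => v) false).Pairwise (· ≤ ·) := by
    simpa using PySem.List.sorted_pairwise vs (fun v => v)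
  rw [pvAdjAll_iff_nodup _ hord]
  exact hperm.nodup_iff

-- token-level isdigit of the pieces against the global character scan, for all-digit pieces
theorem pvMain (s : List Char) :
    (if !(s.all (fun c => PySem.Chars.isdigit c || c == ',')) then false
     else match (pvSplitChar ',' s).mapM PySem.Int.ofChars? with
       | none => false
       | some numbers =>
         if numbers.length ≠ (PySem.Set.ofList numbers).length then false else true)
      =
    (if !((pvSplitChar ',' s).all (fun token => PySem.Chars.strIsdigit token)) then false
     else match (pvSplitChar ',' s).mapM PySem.Int.ofChars? with
       | none => false
       | some vs =>
         ((PySem.List.sorted vs (fun v => v) false).zip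
            (PySem.List.slice (PySem.List.sorted vs (fun v => v) false) (some 1) none)).all
              (fun p => decide (p.1 < p.2))) := by
  simp only [PySem.List.slice_from_one]
  by_cases hall : s.all (fun c => PySem.Chars.isdigit c || c == ',') = true
  · -- character scan passes: every token is all digits
    have htok : (pvSplitChar ',' s).all (fun t => t.all PySem.Chars.isdigit) = true := by
      rw [pvSplitChar_all, List.all_eq_true]
      intro a ha
      have := List.all_eq_true.mp hall a ha
      cases h1 : PySem.Chars.isdigit a <;> cases h2 : (a == ',') <;> simp_all
    have hdig : ∀ t ∈ pvSplitChar ',' s, t.all PySem.Chars.isdigit = true :=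
      List.all_eq_true.mp htok
    simp only [hall, Bool.not_true, Bool.false_eq_true, if_false]
    by_cases hne : (pvSplitChar ',' s).all (fun token => PySem.Chars.strIsdigit token) = true
    · -- every token nonempty: both sides take the match on the same mapM
      simp only [hne, Bool.not_true, Bool.false_eq_true, if_false]
      cases hmap : (pvSplitChar ',' s).mapM PySem.Int.ofChars? with
      | none => rfl
      | some vs =>
        by_cases hnd : vs.Nodup
        · simp [(pv_len_set_eq_iff vs).mpr hnd, (pvSortScan_iff_nodup vs).mpr hnd]
        · have h1 : vs.length ≠ (PySem.Set.ofList vs).length := fun h =>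
            hnd ((pv_len_set_eq_iff vs).mp h)
          have h2 := (pvSortScan_iff_nodup vs)
          simp only [h1, ne_eq]
          cases hb : ((PySem.List.sorted vs (fun v => v) false).zip
              ((PySem.List.sorted vs (fun v => v) false).tail)).all
                (fun p => decide (p.1 < p.2)) with
          | false => simp
          | true => exact absurd (h2.mp hb) hnd
    · -- some token is empty: B's guard fails, and int of the empty token makes A's mapM fail
      have hempty : [] ∈ pvSplitChar ',' s := by
        have hex : ∃ t ∈ pvSplitChar ',' s, ¬ PySem.Chars.strIsdigit t = true := by
          simpa [List.all_eq_true] using hne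
        rcases hex with ⟨t, htm, htf⟩
        have hd := hdig t htm
        cases t with
        | nil => exact htm
        | cons c cs =>
          exact absurd (by simp_all [PySem.Chars.strIsdigit]) htf
      rw [pvMapM_none_of_nil_mem _ hempty]
      simp [hne]
  · -- character scan fails: A is false, and some token fails isdigit so B's guard fails too
    rw [if_pos (by simp [hall])]
    have htok : ¬ ((pvSplitChar ',' s).all (fun t => t.all PySem.Chars.isdigit) = true) := by
      rw [pvSplitChar_all]
      intro hc
      apply hall
      rw [List.all_eq_true] at hc ⊢
      intro a ha
      have := hc a ha
      cases h1 : PySem.Chars.isdigit a <;> cases h2 : (a == ',') <;> simp_all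
    have hbg : ¬ ((pvSplitChar ',' s).all (fun token => PySem.Chars.strIsdigit token) = true) := by
      intro hc
      apply htok
      rw [List.all_eq_true] at hc ⊢
      intro t ht
      have := hc t ht
      simp only [PySem.Chars.strIsdigit, Bool.and_eq_true] at this
      exact this.2
    simp [hbg]

-- ===== VERDICT (by name: the statement is the Claim_ definition above) =====
theorem is_valid_input_spec : Claim_equal_is_valid_input := by
  intro input_string _
  show is_valid_input input_string = is_valid_input_alt input_string
  unfold is_valid_input is_valid_input_alt
  simp only [pvSplitOn_eq]
  exact pvMain (PySem.Chars.replace input_string.toList [' '] [])
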